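-- pv_equiv track=rewrite | github.com/tomatozoo/DataStructure_2021_winter | assignment/huffman_박용주.py | selectTwo
-- ===== SOURCE A (Python) =====
-- def selectTwo(num):
--     minVal = num[0] + num[1]
--     minFir = 0
--     minSec = 1
--
--     for i in range(len(num)-1):
--         if num[i] + num[i+1] < minVal:
--             minVal = num[i] + num[i+1]
--             minFir = i
--             minSec = i+1
--
--     return minFir, minSec
-- ===== SOURCE B (Python) =====
-- def selectTwo(num):
--     order = sorted(range(len(num) - 1), key=lambda i: num[i] + num[i + 1])
--     i = order[0]
--     return i, i + 1
-- ===== Notes on version B (the rewrite author's own statement) =====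
-- stated objective: alternative
-- what changed: Replaces A's single running-min loop (tracking minVal/minFir/minSec) with a stable sort of the gap indices by their adjacent-pair sum followed by taking the first element of the sorted order; stability reproduces A's first-minimum tie-break.
import Mathlib
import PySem

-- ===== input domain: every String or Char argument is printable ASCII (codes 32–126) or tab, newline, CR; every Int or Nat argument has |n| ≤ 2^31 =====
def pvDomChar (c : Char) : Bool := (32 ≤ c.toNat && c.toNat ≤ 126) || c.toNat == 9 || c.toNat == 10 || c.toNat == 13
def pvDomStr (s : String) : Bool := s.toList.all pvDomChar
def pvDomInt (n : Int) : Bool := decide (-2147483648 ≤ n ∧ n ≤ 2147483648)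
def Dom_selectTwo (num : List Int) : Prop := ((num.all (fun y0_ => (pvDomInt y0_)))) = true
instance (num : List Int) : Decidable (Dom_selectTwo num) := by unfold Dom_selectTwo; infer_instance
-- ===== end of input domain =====

-- B replaces A's running-min loop by sorting the gap indices by their adjacent sum (stable sort) and taking the head: alternative algorithm, not faster.

-- ===== PORT A =====
-- literal port of A: running (minVal, minFir, minSec) over `for i in range(len(num)-1)`
def selectTwo (num : List Int) : Int × Int :=
  let init : Int × Int × Int :=
    (PySem.List.pyGetD num 0 0 + PySem.List.pyGetD num 1 0, 0, 1)
  let r :=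
    (PySem.List.pyRange 0 ((num.length : Int) - 1) 1).foldl
      (fun (st : Int × Int × Int) i =>
        if PySem.List.pyGetD num i 0 + PySem.List.pyGetD num (i + 1) 0 < st.1 then
          (PySem.List.pyGetD num i 0 + PySem.List.pyGetD num (i + 1) 0, i, i + 1)
        else st)
      init
  (r.2.1, r.2.2)

-- ===== PORT B =====
-- literal port of B: stable-sort the indices range(len(num)-1) by key num[i]+num[i+1], take order[0]
def selectTwo_alt (num : List Int) : Int × Int :=
  let order :=
    PySem.List.sorted (PySem.List.pyRange 0 ((num.length : Int) - 1) 1)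
      (fun i => PySem.List.pyGetD num i 0 + PySem.List.pyGetD num (i + 1) 0)
  match order with
  | [] => (0, 1)        -- unreachable under Pre_ (Python raises IndexError on order[0])
  | i :: _ => (i, i + 1)

-- ===== PRECONDITION & SPEC =====
-- excluded: lists of length < 2, on which both A and B raise IndexError
def Pre_selectTwo (num : List Int) : Prop := 2 ≤ num.length
instance (num : List Int) : Decidable (Pre_selectTwo num) := by unfold Pre_selectTwo; infer_instance
def pvWitness_selectTwo : List Int := ([1, 2, 3] : List Int)
def Spec_selectTwo (num : List Int) (out : Int × Int) : Prop := out = selectTwo_alt num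
instance (num : List Int) (out : Int × Int) : Decidable (Spec_selectTwo num out) := by unfold Spec_selectTwo; infer_instance

-- ===== CLAIM (what is proved, stated in full; the proofs are below) =====
def Claim_equal_selectTwo : Prop := ∀ (num : List Int), Dom_selectTwo num → Pre_selectTwo num → Spec_selectTwo num (selectTwo num)

-- ===== LEMMAS AND PROOFS =====

-- inserting into a nonempty list: the head becomes x exactly when x sorts strictly before the old head
theorem insertBy_head (lt : Int → Int → Bool) (x h : Int) (t : List Int) :
    ∃ t', PySem.List.insertBy lt x (h :: t) = (if lt x h then x else h) :: t' := by
  by_cases hb : lt x h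
  · exact ⟨h :: t, by simp [PySem.List.insertBy, hb]⟩
  · exact ⟨PySem.List.insertBy lt x t, by simp [PySem.List.insertBy, hb]⟩

-- the head of the insertion-sort fold is the first strict-min (A's running-min recurrence)
theorem foldl_insertBy_head (g : Int → Int) (l : List Int) :
    ∀ (h : Int) (t : List Int),
    ∃ t', (l.foldl (fun acc x => PySem.List.insertBy (fun a b => decide (g a < g b)) x acc) (h :: t))
          = (l.foldl (fun a i => if g i < g a then i else a) h) :: t' := by
  induction l with
  | nil => intro h t; exact ⟨t, rfl⟩
  | cons x l ih =>
    intro h t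
    obtain ⟨t1, ht1⟩ := insertBy_head (fun a b => decide (g a < g b)) x h t
    simp only [List.foldl_cons, ht1]
    by_cases hg : g x < g h
    · simpa [hg] using ih x t1
    · simpa [hg] using ih h t1

-- A's triple state (v, f, f+1) with v = g f projects onto the index-only running-min
theorem triple_fold_eq (g : Int → Int) (l : List Int) :
    ∀ (j : Int),
    l.foldl (fun (st : Int × Int × Int) i => if g i < st.1 then (g i, i, i + 1) else st)
      (g j, j, j + 1)
    = (g (l.foldl (fun a i => if g i < g a then i else a) j),
       l.foldl (fun a i => if g i < g a then i else a) j,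
       l.foldl (fun a i => if g i < g a then i else a) j + 1) := by
  induction l with
  | nil => intro j; rfl
  | cons x l ih =>
    intro j
    simp only [List.foldl_cons]
    by_cases hg : g x < g j
    · simpa [hg] using ih x
    · simpa [hg] using ih j

-- ===== VERDICT (by name: the statement is the Claim_ definition above) =====
theorem selectTwo_spec : Claim_equal_selectTwo := by
  intro num _ hpre
  unfold Pre_selectTwo at hpre
  unfold Spec_selectTwo selectTwo selectTwo_alt
  set g : Int → Int := fun i => PySem.List.pyGetD num i 0 + PySem.List.pyGetD num (i + 1) 0 with hg
  have h01 : (0 : Int) < (num.length : Int) - 1 := by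
    have : (2 : Int) ≤ (num.length : Int) := by exact_mod_cast hpre
    omega
  have hcons : PySem.List.pyRange 0 ((num.length : Int) - 1) 1
      = 0 :: PySem.List.pyRange 1 ((num.length : Int) - 1) 1 := by
    simpa using PySem.List.pyRange_one_cons h01
  set rest := PySem.List.pyRange 1 ((num.length : Int) - 1) 1 with hrest
  -- A's init value is g 0 with indices (0, 1); the i = 0 step is a no-op under strict <
  have hinit : (PySem.List.pyGetD num 0 0 + PySem.List.pyGetD num 1 0, (0 : Int), (1 : Int))
      = ((g 0, (0 : Int), (0 : Int) + 1) : Int × Int × Int) := by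
    simp [hg]
  -- compute A's side
  have hA :
      ((PySem.List.pyRange 0 ((num.length : Int) - 1) 1).foldl
        (fun (st : Int × Int × Int) i => if g i < st.1 then (g i, i, i + 1) else st)
        (g 0, 0, 0 + 1))
      = (g (rest.foldl (fun a i => if g i < g a then i else a) 0),
         rest.foldl (fun a i => if g i < g a then i else a) 0,
         rest.foldl (fun a i => if g i < g a then i else a) 0 + 1) := by
    rw [hcons]
    simp only [List.foldl_cons, lt_irrefl, if_false]
    exact triple_fold_eq g rest 0
  -- compute B's side
  have hB : ∃ t', PySem.List.sorted (PySem.List.pyRange 0 ((num.length : Int) - 1) 1) g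
      = (rest.foldl (fun a i => if g i < g a then i else a) 0) :: t' := by
    rw [PySem.List.sorted_eq_foldl_insertBy, hcons]
    simp only [List.foldl_cons]
    have : PySem.List.insertBy (fun a b => decide (g a < g b)) 0 ([] : List Int) = [0] := rfl
    rw [this]
    exact foldl_insertBy_head g rest 0 []
  obtain ⟨t', ht'⟩ := hB
  have hfun : (fun (st : Int × Int × Int) i =>
      if PySem.List.pyGetD num i 0 + PySem.List.pyGetD num (i + 1) 0 < st.1 then
        (PySem.List.pyGetD num i 0 + PySem.List.pyGetD num (i + 1) 0, i, i + 1)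
      else st)
      = (fun (st : Int × Int × Int) i => if g i < st.1 then (g i, i, i + 1) else st) := rfl
  dsimp only
  rw [hfun, hinit, hA, ht']
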